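-- pv_equiv track=rewrite | github.com/filizmolla/cdtp | Ekstra/Ekstra Kodlarim/untitled3.py | permutations_with_constraints
-- ===== SOURCE A (Python) =====
-- from itertools import permutations
--
-- def is_within_constraints(value, constraint):
--     lower_limit, upper_limit = min(constraint), max(constraint)
--     return lower_limit <= value <= upper_limit
--
-- def permutations_with_constraints(lst, constraints):
--     if not lst or len(lst) != len(constraints):
--         return []
--
--     valid_permutations = []
--
--     for perm in permutations(lst):
--         valid = all(is_within_constraints(float(perm[i]), constraints[i]) for i in range(len(perm)))
--         if valid:
--             valid_permutations.append(list(perm))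
--
--     return valid_permutations
-- ===== SOURCE B (Python) =====
-- def permutations_with_constraints(lst, constraints):
--     if not lst or len(lst) != len(constraints):
--         return []
--
--     result = []
--
--     def extend(prefix, remaining, cons):
--         if not remaining:
--             result.append(prefix)
--             return
--         lo, hi = min(cons[0]), max(cons[0])
--         for i, v in enumerate(remaining):
--             if lo <= v <= hi:
--                 extend(prefix + [v], remaining[:i] + remaining[i + 1:], cons[1:])
--
--     extend([], lst, constraints)
--     return result
-- ===== Notes on version B (the rewrite author's own statement) =====
-- stated objective: alternative
-- what changed: Replaced A's exhaustive enumeration of all n! permutations followed by per-position filtering with a backtracking DFS that, at each search depth, computes that position's (min,max) bounds and prunes a partial permutation as soon as a value violates them; bounds are looked at lazily, only when a prefix reaches that position, exactly as A's short-circuiting all() does.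
-- outside the precondition, e.g. on permutations_with_constraints([1, 2], [(0, 9), ()]): A raises ValueError, B raises ValueError
import Mathlib
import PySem

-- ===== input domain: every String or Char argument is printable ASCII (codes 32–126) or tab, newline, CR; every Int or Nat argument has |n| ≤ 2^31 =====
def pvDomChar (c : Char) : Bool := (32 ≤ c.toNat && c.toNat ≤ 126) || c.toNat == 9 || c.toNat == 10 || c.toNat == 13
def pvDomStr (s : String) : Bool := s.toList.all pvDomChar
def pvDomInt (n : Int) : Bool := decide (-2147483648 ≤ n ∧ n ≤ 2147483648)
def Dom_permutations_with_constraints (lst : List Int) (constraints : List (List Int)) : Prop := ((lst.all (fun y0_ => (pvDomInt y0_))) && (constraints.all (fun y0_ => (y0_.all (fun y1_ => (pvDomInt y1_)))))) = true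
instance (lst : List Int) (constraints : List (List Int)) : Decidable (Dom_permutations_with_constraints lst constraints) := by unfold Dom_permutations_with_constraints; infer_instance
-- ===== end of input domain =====

-- B replaces A's enumerate-all-permutations-then-filter with a backtracking DFS that prunes
-- each candidate against its position's (min, max) bounds, looked up lazily at that depth.

-- ===== PORT A =====
-- (v, rest) pairs: v taken from each position in turn, rest = the list without it, order kept.
def pwcPicks : List Int → List (Int × List Int)
  | [] => []
  | x :: xs => (x, xs) :: (pwcPicks xs).map (fun p => (p.1, x :: p.2))

theorem pwcPicks_length {xs : List Int} {p : Int × List Int} (h : p ∈ pwcPicks xs) :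
    p.2.length + 1 = xs.length := by
  induction xs generalizing p with
  | nil => simp [pwcPicks] at h
  | cons x xs ih =>
    simp only [pwcPicks, List.mem_cons, List.mem_map] at h
    rcases h with h | ⟨q, hq, rfl⟩
    · subst h; simp
    · have := ih hq; simp at this ⊢; omega

-- itertools.permutations(lst): in lst-index order, pick each element first, then permute the rest.
def pwcPerms : List Int → List (List Int)
  | [] => [[]]
  | x :: xs => (pwcPicks (x :: xs)).attach.flatMap
      (fun p => (pwcPerms p.1.2).map (fun q => p.1.1 :: q))
termination_by xs => xs.length
decreasing_by have := pwcPicks_length p.2; omega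

-- is_within_constraints: min(constraint) <= value <= max(constraint).
-- float(value) is exact on the domain (|n| ≤ 2^31), so the comparison stays on Int.
-- The `none` branch is Python's ValueError on an empty constraint, excluded by Pre_.
def pwcIsWithin (value : Int) (constraint : List Int) : Bool :=
  match PySem.List.min? constraint (fun y => y), PySem.List.max? constraint (fun y => y) with
  | some lo, some hi => decide (lo ≤ value ∧ value ≤ hi)
  | _, _ => false

def permutations_with_constraints (lst : List Int) (constraints : List (List Int)) : List (List Int) :=
  if lst = [] ∨ lst.length ≠ constraints.length then []
  else
    (pwcPerms lst).foldl
      (fun acc perm =>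
        if (List.range perm.length).all
            (fun i => pwcIsWithin (perm.getD i 0) (constraints.getD i []))
        then acc ++ [perm] else acc)
      []

-- ===== PORT B =====
-- extend(prefix, remaining, cons): lo, hi = min(cons[0]), max(cons[0]) computed only when a
-- prefix reaches this depth; the enumerate/slice loop is the flatMap over pwcPicks
-- (at index i: v = remaining[i], remaining[:i] + remaining[i+1:]).
-- The getD 0 / empty-cons branches are where Python raises (ValueError / IndexError),
-- excluded by Pre_; cons is never shorter than remaining when called from the entry point.
def pwcExtend (pre : List Int) (remaining : List Int) (cons : List (List Int)) : List (List Int) :=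
  match remaining with
  | [] => [pre]
  | v :: rem =>
    match cons with
    | [] => []
    | c :: rest =>
      let lo := (PySem.List.min? c (fun y => y)).getD 0
      let hi := (PySem.List.max? c (fun y => y)).getD 0
      (pwcPicks (v :: rem)).attach.flatMap
        (fun p =>
          if lo ≤ p.1.1 ∧ p.1.1 ≤ hi then pwcExtend (pre ++ [p.1.1]) p.1.2 rest else [])
termination_by remaining.length
decreasing_by have := pwcPicks_length p.2; simp only [List.length_cons] at this ⊢; omega

def permutations_with_constraints_alt (lst : List Int) (constraints : List (List Int)) : List (List Int) :=
  if lst = [] ∨ lst.length ≠ constraints.length then []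
  else pwcExtend [] lst constraints

-- ===== PRECONDITION & SPEC =====
-- Pre_ excludes only equal-length nonempty inputs containing an empty constraint list:
-- there Python's min([]) raises ValueError in both A and B as soon as a permutation prefix
-- satisfies all earlier positions and reaches it (and whether that happens depends on the
-- search, not on a closed-form shape of the input). Mismatched lengths and empty lst stay
-- inside Pre_: both programs return [] there.
def Pre_permutations_with_constraints (lst : List Int) (constraints : List (List Int)) : Prop :=
  (lst ≠ [] ∧ lst.length = constraints.length) → ∀ c ∈ constraints, 0 < c.length

instance (lst : List Int) (constraints : List (List Int)) : Decidable (Pre_permutations_with_constraints lst constraints) := by unfold Pre_permutations_with_constraints; infer_instance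

def pvWitness_permutations_with_constraints : List Int × List (List Int) := ([1, 2], [[1, 2], [0, 3]])

def Spec_permutations_with_constraints (lst : List Int) (constraints : List (List Int)) (out : List (List Int)) : Prop := out = permutations_with_constraints_alt lst constraints
instance (lst : List Int) (constraints : List (List Int)) (out : List (List Int)) : Decidable (Spec_permutations_with_constraints lst constraints out) := by unfold Spec_permutations_with_constraints; infer_instance

-- ===== CLAIM (what is proved, stated in full; the proofs are below) =====
def Claim_equal_permutations_with_constraints : Prop := ∀ (lst : List Int) (constraints : List (List Int)), Dom_permutations_with_constraints lst constraints → Pre_permutations_with_constraints lst constraints → Spec_permutations_with_constraints lst constraints (permutations_with_constraints lst constraints)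

-- ===== LEMMAS AND PROOFS =====

-- position-wise bounds check against the constraint list, written as B evaluates it.
def pwcCheckC : List (List Int) → List Int → Bool
  | _, [] => true
  | [], _ :: _ => false
  | c :: cs, v :: vs =>
      (decide ((PySem.List.min? c (fun y => y)).getD 0 ≤ v ∧
               v ≤ (PySem.List.max? c (fun y => y)).getD 0)) && pwcCheckC cs vs

theorem pwcPerms_length : ∀ (xs : List Int), ∀ p ∈ pwcPerms xs, p.length = xs.length := by
  intro xs
  induction xs using pwcPerms.induct with
  | case1 =>
    intro p hp; simp [pwcPerms] at hp; simp [hp]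
  | case2 x xs ih =>
    intro p hp
    rw [pwcPerms.eq_def] at hp
    simp only [List.mem_flatMap, List.mem_attach, true_and, List.mem_map, Subtype.exists] at hp
    obtain ⟨q, hq, r, hr, rfl⟩ := hp
    have h1 := pwcPicks_length hq
    have h2 : r.length = q.2.length := ih ⟨q, hq⟩ r hr
    simp only [List.length_cons] at h1 ⊢
    omega

theorem pwcExtend_eq : ∀ (pre remaining : List Int) (cons : List (List Int)),
    pwcExtend pre remaining cons =
      ((pwcPerms remaining).filter (fun p => pwcCheckC cons p)).map (fun p => pre ++ p) := by
  intro pre remaining cons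
  induction pre, remaining, cons using pwcExtend.induct with
  | case1 pre cons =>
    rw [pwcExtend.eq_def]
    simp [pwcPerms, pwcCheckC]
  | case2 pre x xs =>
    rw [pwcExtend.eq_def]
    have hfalse : ∀ q ∈ pwcPerms (x :: xs), ¬ (pwcCheckC [] q = true) := by
      intro q hq
      have hl := pwcPerms_length _ q hq
      match q with
      | [] => simp at hl
      | _ :: _ => simp [pwcCheckC]
    rw [List.filter_eq_nil_iff.mpr hfalse]
    simp
  | case3 pre x xs c rest ih =>
    rw [pwcExtend.eq_def]
    dsimp only
    rw [pwcPerms.eq_def]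
    dsimp only
    rw [List.filter_flatMap, List.map_flatMap]
    congr 1
    funext p
    obtain ⟨⟨v, rst⟩, hmem⟩ := p
    dsimp only
    set lo := (PySem.List.min? c (fun y => y)).getD 0 with hlo
    set hi := (PySem.List.max? c (fun y => y)).getD 0 with hhi
    by_cases hv : lo ≤ v ∧ v ≤ hi
    · rw [if_pos hv, ih ⟨(v, rst), hmem⟩, List.filter_map, List.map_map]
      dsimp only
      have hpred : ((fun p => pwcCheckC (c :: rest) p) ∘ fun q => v :: q)
          = fun q => pwcCheckC rest q := by
        funext q; simp [pwcCheckC, ← hlo, ← hhi, hv.1, hv.2]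
      have hfun : ((fun p => pre ++ p) ∘ fun q => v :: q) = fun q => pre ++ [v] ++ q := by
        funext q; simp
      rw [hpred, hfun]
    · rw [if_neg hv, List.filter_map]
      rw [List.filter_eq_nil_iff.mpr]
      · simp
      · intro q hq
        simp only [Function.comp_apply, pwcCheckC]
        simp only [Bool.and_eq_true, decide_eq_true_eq, not_and, ← hlo, ← hhi]
        intro h; exact absurd h hv

theorem pwcCheckC_eq_range (cs : List (List Int)) (p : List Int)
    (hne : ∀ c ∈ cs, c ≠ []) (hlen : p.length = cs.length) :
    (List.range p.length).all
        (fun i => pwcIsWithin (p.getD i 0) (cs.getD i [])) =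
      pwcCheckC cs p := by
  induction p generalizing cs with
  | nil => simp [pwcCheckC]
  | cons v vs ih =>
    match cs with
    | [] => simp at hlen
    | [] :: cs' => exact absurd rfl (hne [] (by simp))
    | (a :: c') :: cs' =>
      have hne' : ∀ c ∈ cs', c ≠ [] := fun c hc => hne c (by simp [hc])
      have hlen' : vs.length = cs'.length := by simp at hlen; omega
      rw [List.length_cons, List.range_succ_eq_map]
      simp only [List.all_cons, List.all_map, Function.comp_def, List.getD_cons_succ,
        List.getD_cons_zero]
      rw [ih cs' hne' hlen']
      simp only [pwcCheckC, pwcIsWithin,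
        PySem.List.min?_id_cons, PySem.List.max?_id_cons, Option.getD_some]

-- ===== VERDICT (by name: the statement is the Claim_ definition above) =====
theorem permutations_with_constraints_spec : Claim_equal_permutations_with_constraints := by
  intro lst cs _hdom hpre
  unfold Spec_permutations_with_constraints permutations_with_constraints permutations_with_constraints_alt
  by_cases hg : lst = [] ∨ lst.length ≠ cs.length
  · simp [hg]
  · rw [if_neg hg, if_neg hg]
    push Not at hg
    have hne : ∀ c ∈ cs, c ≠ [] := by
      intro c hc h
      have := hpre ⟨hg.1, hg.2⟩ c hc
      simp [h] at this
    rw [PySem.List.foldl_append_if]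
    rw [pwcExtend_eq]
    have hcong := List.filter_congr
      (fun p hp => pwcCheckC_eq_range cs p hne ((pwcPerms_length _ p hp).trans hg.2))
    rw [hcong]
    simp
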